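-- pv_equiv track=rewrite | github.com/sheryllan/Algo | bulbs_shine_count.py | solution
-- ===== SOURCE A (Python) =====
-- def solution(A):
--     max_i = 0
--     shine_cnt = 0
--     for i, bulb in sorted(enumerate(A), key=lambda x: x[1]):
--         if i >= max_i:
--             shine_cnt += 1
--             max_i = i
--
--     return shine_cnt
-- ===== SOURCE B (Python) =====
-- def solution(A):
--     # One backward pass: a bulb at i shines-complete moment iff A[i] <= min(A[i+1:]).
--     cnt = 0
--     m = None
--     for x in reversed(A):
--         if m is None or x <= m:
--             cnt += 1
--             m = x
--     return cnt
-- ===== Notes on version B (the rewrite author's own statement) =====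
-- stated objective: faster
-- what changed: Replaced sort-enumerate-then-scan with a single backward pass keeping the running minimum of the suffix and counting positions whose value is <= that minimum.
import Mathlib
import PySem

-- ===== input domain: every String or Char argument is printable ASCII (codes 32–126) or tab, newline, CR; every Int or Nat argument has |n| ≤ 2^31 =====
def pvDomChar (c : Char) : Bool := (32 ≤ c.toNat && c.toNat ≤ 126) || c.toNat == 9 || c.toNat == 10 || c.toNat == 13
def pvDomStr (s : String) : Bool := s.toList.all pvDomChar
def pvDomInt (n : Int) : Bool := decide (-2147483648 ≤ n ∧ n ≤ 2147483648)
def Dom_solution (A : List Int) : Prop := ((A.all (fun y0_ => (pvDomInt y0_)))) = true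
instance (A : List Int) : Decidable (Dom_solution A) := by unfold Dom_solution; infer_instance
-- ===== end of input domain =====

-- B replaces sort-then-scan by a single backward pass over A keeping the running
-- minimum of the suffix (objective: faster, one linear pass instead of a sort).

-- ===== PORT A =====
-- for i, bulb in sorted(enumerate(A), key=lambda x: x[1]): if i >= max_i: cnt += 1; max_i = i
def solution (A : List Int) : Int :=
  ((PySem.List.sorted (PySem.List.enumerate A 0) (fun x => x.2) false).foldl
      (fun st p => if st.1 ≤ p.1 then (p.1, st.2 + 1) else st) ((0 : Int), (0 : Int))).2

-- ===== PORT B =====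
-- for x in reversed(A): if m is None or x <= m: cnt += 1; m = x
def solution_alt (A : List Int) : Int :=
  (A.reverse.foldl
      (fun (st : Int × Option Int) x =>
        match st.2 with
        | none => (st.1 + 1, some x)
        | some z => if x ≤ z then (st.1 + 1, some x) else st)
      ((0 : Int), none)).1

-- ===== PRECONDITION & SPEC =====
def Spec_solution (A : List Int) (out : Int) : Prop := out = solution_alt A
instance (A : List Int) (out : Int) : Decidable (Spec_solution A out) := by unfold Spec_solution; infer_instance

-- ===== CLAIM (what is proved, stated in full; the proofs are below) =====
def Claim_equal_solution : Prop := ∀ (A : List Int), Dom_solution A → Spec_solution A (solution A)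

-- ===== LEMMAS AND PROOFS =====

-- strict lexicographic order on (index, value) pairs by (value, index)
def pvLex (p q : Int × Int) : Prop := p.2 < q.2 ∨ (p.2 = q.2 ∧ p.1 < q.1)

-- shared spec: number of positions whose value is ≤ every later value (and ≤ m)
def pvOk (m : Option Int) (x : Int) (xs : List Int) : Bool :=
  xs.all (fun y => x ≤ y) && (match m with | none => true | some z => x ≤ z)

def pvCnt : Option Int → List Int → Int
  | _, [] => 0
  | m, x :: xs => (if pvOk m x xs then 1 else 0) + pvCnt m xs

def pvMin : Option Int → List Int → Option Int
  | m, [] => m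
  | m, x :: xs =>
      match pvMin m xs with
      | none => some x
      | some z => some (min z x)

lemma pvMin_none {m : Option Int} {xs : List Int} :
    pvMin m xs = none ↔ m = none ∧ xs = [] := by
  cases xs with
  | nil => simp [pvMin]
  | cons x xs =>
      simp only [pvMin]
      cases pvMin m xs <;> simp

lemma pvMin_le {m : Option Int} : ∀ (xs : List Int) (z : Int), pvMin m xs = some z →
    (∀ y ∈ xs, z ≤ y) ∧ (∀ w, m = some w → z ≤ w) := by
  intro xs
  induction xs with
  | nil => intro z h; simp [pvMin] at h; subst h; simp_all
  | cons x xs ih =>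
      intro z h
      simp only [pvMin] at h
      cases hm : pvMin m xs with
      | none =>
          rw [hm] at h
          rcases pvMin_none.mp hm with ⟨hm1, hm2⟩
          cases h; subst hm2
          simp [hm1]
      | some z' =>
          rw [hm] at h
          cases h
          rcases ih z' hm with ⟨h1, h2⟩
          refine ⟨?_, ?_⟩
          · intro y hy
            rcases List.mem_cons.mp hy with rfl | hy
            · exact min_le_right _ _
            · exact le_trans (min_le_left _ _) (h1 y hy)
          · intro w hw
            exact le_trans (min_le_left _ _) (h2 w hw)

lemma pvMin_mem {m : Option Int} : ∀ (xs : List Int) (z : Int), pvMin m xs = some z →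
    z ∈ xs ∨ m = some z := by
  intro xs
  induction xs with
  | nil => intro z h; simp [pvMin] at h; simp [h]
  | cons x xs ih =>
      intro z h
      simp only [pvMin] at h
      cases hm : pvMin m xs with
      | none => rw [hm] at h; cases h; simp
      | some z' =>
          rw [hm] at h
          cases h
          rcases le_total z' x with hle | hle
          · rw [min_eq_left hle]
            rcases ih z' hm with h' | h'
            · exact Or.inl (List.mem_cons_of_mem _ h')
            · exact Or.inr h'
          · rw [min_eq_right hle]
            exact Or.inl (List.mem_cons_self)

-- B's loop over reversed(A) computes pvCnt and the running minimum
lemma B_fold (A : List Int) : ∀ (c : Int) (m : Option Int),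
    A.reverse.foldl
      (fun (st : Int × Option Int) x =>
        match st.2 with
        | none => (st.1 + 1, some x)
        | some z => if x ≤ z then (st.1 + 1, some x) else st)
      (c, m) = (c + pvCnt m A, pvMin m A) := by
  induction A with
  | nil => intro c m; simp [pvCnt, pvMin]
  | cons x xs ih =>
      intro c m
      rw [List.reverse_cons, List.foldl_append, ih c m]
      simp only [List.foldl_cons, List.foldl_nil]
      cases hm : pvMin m xs with
      | none =>
          rcases pvMin_none.mp hm with ⟨hm1, hm2⟩
          subst hm1; subst hm2
          simp [pvCnt, pvMin, pvOk]
      | some z =>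
          by_cases hx : x ≤ z
          · have hok : pvOk m x xs = true := by
              rcases pvMin_le _ _ hm with ⟨h1, h2⟩
              simp only [pvOk, Bool.and_eq_true, List.all_eq_true]
              constructor
              · intro y hy; exact decide_eq_true (le_trans hx (h1 y hy))
              · cases m with
                | none => rfl
                | some w => exact decide_eq_true (le_trans hx (h2 w rfl))
            simp only [pvCnt, pvMin, hm, hok, if_true, if_pos hx]
            have : min z x = x := min_eq_right hx
            rw [this]
            simp only [Prod.mk.injEq]
            exact ⟨by ring, trivial⟩
          · have hok : pvOk m x xs = false := by
              simp only [pvOk, Bool.and_eq_false_iff]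
              rcases pvMin_mem _ _ hm with hz | hz
              · left
                simp only [List.all_eq_false]
                exact ⟨z, hz, by simp [hx]⟩
              · right; rw [hz]; simp [hx]
            simp only [pvCnt, pvMin, hm, hok, if_neg hx]
            have : min z x = z := min_eq_left (le_of_not_ge hx)
            rw [this]
            simp

-- stability: inserting a pair whose index exceeds all present keeps strict (value,index) order
lemma ins_lex (x : Int × Int) : ∀ (acc : List (Int × Int)),
    acc.Pairwise pvLex → (∀ p ∈ acc, p.1 < x.1) →
    (PySem.List.insertBy (fun a b => decide (a.2 < b.2)) x acc).Pairwise pvLex := by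
  intro acc
  induction acc with
  | nil => intro _ _; simp [PySem.List.insertBy]
  | cons y t ih =>
      intro h1 h2
      rw [List.pairwise_cons] at h1
      rcases h1 with ⟨hyt, ht⟩
      by_cases hxy : x.2 < y.2
      · rw [show PySem.List.insertBy (fun a b => decide (a.2 < b.2)) x (y :: t)
              = x :: y :: t by simp [PySem.List.insertBy, hxy]]
        refine List.Pairwise.cons ?_ (List.Pairwise.cons hyt ht)
        intro q hq
        rcases List.mem_cons.mp hq with rfl | hq
        · exact Or.inl hxy
        · rcases hyt q hq with h | ⟨h, _⟩
          · exact Or.inl (lt_trans hxy h)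
          · exact Or.inl (h ▸ hxy)
      · rw [show PySem.List.insertBy (fun a b => decide (a.2 < b.2)) x (y :: t)
              = y :: PySem.List.insertBy (fun a b => decide (a.2 < b.2)) x t by
            simp [PySem.List.insertBy, hxy]]
        refine List.Pairwise.cons ?_ (ih ht (fun p hp => h2 p (List.mem_cons_of_mem _ hp)))
        intro q hq
        rcases (PySem.List.mem_insertBy _ _ _ _).mp hq with rfl | hq
        · rcases lt_or_eq_of_le (le_of_not_gt hxy) with h | h
          · exact Or.inl h
          · exact Or.inr ⟨h, h2 y List.mem_cons_self⟩
        · exact hyt q hq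

lemma fold_ins_lex : ∀ (L acc : List (Int × Int)),
    L.Pairwise (fun p q => p.1 < q.1) → acc.Pairwise pvLex →
    (∀ p ∈ acc, ∀ q ∈ L, p.1 < q.1) →
    (L.foldl (fun acc x => PySem.List.insertBy (fun a b => decide (a.2 < b.2)) x acc) acc).Pairwise pvLex := by
  intro L
  induction L with
  | nil => intro acc _ h _; simpa using h
  | cons x L ih =>
      intro acc hL hacc hbound
      rw [List.pairwise_cons] at hL
      rcases hL with ⟨hxL, hL⟩
      simp only [List.foldl_cons]
      refine ih _ hL (ins_lex x acc hacc (fun p hp => hbound p hp x List.mem_cons_self)) ?_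
      intro p hp q hq
      rcases (PySem.List.mem_insertBy _ _ _ _).mp hp with rfl | hp
      · exact hxL q hq
      · exact hbound p hp q (List.mem_cons_of_mem _ hq)

lemma sorted_lex (A : List Int) :
    (PySem.List.sorted (PySem.List.enumerate A 0) (fun x => x.2) false).Pairwise pvLex := by
  rw [PySem.List.sorted_eq_foldl_insertBy]
  exact fold_ins_lex _ [] (PySem.List.pairwise_lt_enumerate A 0) List.Pairwise.nil (by simp)

-- named Bool predicate: "index at least m, and value ≤ every later-indexed value in E"
def pvPredM (m : Int) (E : List (Int × Int)) (p : Int × Int) : Bool :=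
  decide (m ≤ p.1) && E.all (fun q => !decide (p.1 < q.1) || decide (p.2 ≤ q.2))

lemma pvPredM_iff {m : Int} {E : List (Int × Int)} {p : Int × Int} :
    pvPredM m E p = true ↔ (m ≤ p.1 ∧ ∀ q ∈ E, p.1 < q.1 → p.2 ≤ q.2) := by
  simp [pvPredM, List.all_eq_true, imp_iff_not_or]

-- A's record-counting loop over a strictly lex-sorted list counts the pvPredM pairs
lemma A_fold : ∀ (S : List (Int × Int)), S.Pairwise pvLex → ∀ (m c : Int),
    (S.foldl (fun st p => if st.1 ≤ p.1 then (p.1, st.2 + 1) else st) (m, c)).2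
      = c + (S.countP (pvPredM m S) : Int) := by
  intro S
  induction S with
  | nil => intro _ m c; simp
  | cons p rest ih =>
      intro hpw m c
      rw [List.pairwise_cons] at hpw
      rcases hpw with ⟨hp, hrest⟩
      simp only [List.foldl_cons, List.countP_cons]
      by_cases h : m ≤ p.1
      · rw [if_pos h, ih hrest p.1 (c + 1)]
        have hpred : pvPredM m (p :: rest) p = true := by
          apply pvPredM_iff.mpr
          refine ⟨h, ?_⟩
          intro q hq hlt
          rcases List.mem_cons.mp hq with rfl | hq
          · omega
          · rcases hp q hq with h' | ⟨h', _⟩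
            · exact le_of_lt h'
            · exact le_of_eq h'
        rw [hpred]
        have hcongr : rest.countP (pvPredM m (p :: rest))
            = rest.countP (pvPredM p.1 rest) := by
          apply List.countP_congr
          intro p' hp'
          rw [pvPredM_iff, pvPredM_iff]
          constructor
          · rintro ⟨_, hall⟩
            by_cases hle : p.1 ≤ p'.1
            · exact ⟨hle, fun q hq => hall q (List.mem_cons_of_mem _ hq)⟩
            · exfalso
              have h1 : p'.2 ≤ p.2 := hall p List.mem_cons_self (by omega)
              rcases hp p' hp' with h' | ⟨h', h''⟩
              · omega
              · omega
          · rintro ⟨hle, hall⟩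
            refine ⟨le_trans h hle, ?_⟩
            intro q hq hlt
            rcases List.mem_cons.mp hq with rfl | hq
            · omega
            · exact hall q hq hlt
        rw [hcongr]
        simp only [if_true]
        push_cast
        ring
      · rw [if_neg h, ih hrest m c]
        have hpred : pvPredM m (p :: rest) p = false := by
          rw [Bool.eq_false_iff]
          intro hc
          exact h (pvPredM_iff.mp hc).1
        rw [hpred]
        have hcongr : rest.countP (pvPredM m (p :: rest))
            = rest.countP (pvPredM m rest) := by
          apply List.countP_congr
          intro p' hp'
          rw [pvPredM_iff, pvPredM_iff]
          constructor
          · rintro ⟨hm, hall⟩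
            exact ⟨hm, fun q hq => hall q (List.mem_cons_of_mem _ hq)⟩
          · rintro ⟨hm, hall⟩
            refine ⟨hm, ?_⟩
            intro q hq hlt
            rcases List.mem_cons.mp hq with rfl | hq
            · omega
            · exact hall q hq hlt
        rw [hcongr]
        simp

-- the perm-invariant count over enumerate equals the shared spec pvCnt
lemma countE : ∀ (xs : List Int) (s : Int), 0 ≤ s →
    ((PySem.List.enumerate xs s).countP (pvPredM 0 (PySem.List.enumerate xs s)) : Int)
      = pvCnt none xs := by
  intro xs
  induction xs with
  | nil => intro s _; simp [PySem.List.enumerate_nil, pvCnt]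
  | cons x xs ih =>
      intro s hs
      rw [PySem.List.enumerate_cons, List.countP_cons]
      have hmemgt : ∀ p ∈ PySem.List.enumerate xs (s + 1), s < p.1 := by
        intro p hp
        rcases (PySem.List.mem_enumerate_iff _ _ _).mp hp with ⟨k, hk, rfl⟩
        omega
      have hhead : pvPredM 0 (((s : Int), x) :: PySem.List.enumerate xs (s + 1)) ((s : Int), x)
          = pvOk none x xs := by
        by_cases hall : ∀ y ∈ xs, x ≤ y
        · have h2 : pvOk none x xs = true := by
            simp only [pvOk, Bool.and_true, List.all_eq_true]
            intro y hy; exact decide_eq_true (hall y hy)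
          rw [h2]
          apply pvPredM_iff.mpr
          refine ⟨hs, ?_⟩
          intro q hq hlt
          rcases List.mem_cons.mp hq with rfl | hq
          · exact absurd hlt (lt_irrefl _)
          · rcases (PySem.List.mem_enumerate_iff _ _ _).mp hq with ⟨k, hk, rfl⟩
            exact hall _ (List.getElem_mem hk)
        · have h2 : pvOk none x xs = false := by
            simp only [pvOk, Bool.and_true, List.all_eq_false]
            push_neg at hall
            rcases hall with ⟨y, hy, hxy⟩
            exact ⟨y, hy, by simp [hxy]⟩
          rw [h2, Bool.eq_false_iff]
          intro hc
          rcases pvPredM_iff.mp hc with ⟨_, hforall⟩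
          push_neg at hall
          rcases hall with ⟨y, hy, hxy⟩
          rcases List.getElem_of_mem hy with ⟨k, hk, rfl⟩
          have := hforall (s + 1 + k, xs[k]) (List.mem_cons_of_mem _
            ((PySem.List.mem_enumerate_iff _ _ _).mpr ⟨k, hk, by ring_nf⟩)) (by omega)
          exact absurd this (by omega)
      have hcongr : (PySem.List.enumerate xs (s + 1)).countP
            (pvPredM 0 (((s : Int), x) :: PySem.List.enumerate xs (s + 1)))
          = (PySem.List.enumerate xs (s + 1)).countP
            (pvPredM 0 (PySem.List.enumerate xs (s + 1))) := by
        apply List.countP_congr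
        intro p hp
        rw [pvPredM_iff, pvPredM_iff]
        constructor
        · rintro ⟨h0, hall⟩
          exact ⟨h0, fun q hq => hall q (List.mem_cons_of_mem _ hq)⟩
        · rintro ⟨h0, hall⟩
          refine ⟨h0, ?_⟩
          intro q hq hlt
          rcases List.mem_cons.mp hq with rfl | hq
          · exact absurd hlt (by have := hmemgt p hp; simp; omega)
          · exact hall q hq hlt
      rw [hhead, hcongr]
      simp only [pvCnt]
      rw [← ih (s + 1) (by omega)]
      push_cast
      cases pvOk none x xs <;> simp [add_comm]

lemma main_eq (A : List Int) : solution A = solution_alt A := by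
  unfold solution solution_alt
  rw [B_fold A 0 none]
  have hperm := PySem.List.sorted_perm (PySem.List.enumerate A 0) (fun x : Int × Int => x.2) false
  rw [A_fold _ (sorted_lex A) 0 0]
  have hc1 : (PySem.List.sorted (PySem.List.enumerate A 0) (fun x : Int × Int => x.2) false).countP
        (pvPredM 0 (PySem.List.sorted (PySem.List.enumerate A 0) (fun x : Int × Int => x.2) false))
      = (PySem.List.sorted (PySem.List.enumerate A 0) (fun x : Int × Int => x.2) false).countP
        (pvPredM 0 (PySem.List.enumerate A 0)) := by
    apply List.countP_congr
    intro p _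
    rw [pvPredM_iff, pvPredM_iff]
    constructor
    · rintro ⟨h0, hall⟩; exact ⟨h0, fun q hq => hall q (hperm.mem_iff.mpr hq)⟩
    · rintro ⟨h0, hall⟩; exact ⟨h0, fun q hq => hall q (hperm.mem_iff.mp hq)⟩
  rw [hc1, hperm.countP_eq]
  rw [countE A 0 le_rfl]

-- ===== VERDICT (by name: the statement is the Claim_ definition above) =====
theorem solution_spec : Claim_equal_solution := by
  intro A _
  unfold Spec_solution
  exact main_eq A
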